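-- pv_equiv track=rewrite | github.com/elevanaltd/octave-mcp | tests/properties/test_literal_zones_property.py | _scale_fence_for_content
-- ===== SOURCE A (Python) =====
-- def _scale_fence_for_content(content: str) -> tuple[str, str]:
--     """Compute the minimum safe fence marker for content.
--
--     Scans content for the longest contiguous run of backticks and returns
--     a fence marker that is strictly longer. This eliminates any need to
--     skip content with backtick sequences.
--
--     Returns:
--         (fence_marker, content) tuple where fence_marker is >= 3 and
--         strictly longer than any run of backticks in content.
--     """
--     max_run = 0
--     current_run = 0
--     for ch in content:
--         if ch == "`":
--             current_run += 1
--             max_run = max(max_run, current_run)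
--         else:
--             current_run = 0
--     # Fence must be at least 3 and strictly longer than any run in content
--     fence_len = max(3, max_run + 1)
--     return ("`" * fence_len, content)
-- ===== SOURCE B (Python) =====
-- def _scale_fence_for_content(content: str) -> tuple[str, str]:
--     """Return the shortest fence marker of length >= 3 that does not occur in content."""
--     n = 3
--     while "`" * n in content:
--         n += 1
--     return ("`" * n, content)
-- ===== Notes on version B (the rewrite author's own statement) =====
-- stated objective: simpler
-- what changed: Replaces the explicit per-character scan maintaining max/current run counters with a search for the shortest fence of length >= 3 that does not occur as a substring ('`'*n in content), reducing the function to a tiny while loop.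
import Mathlib
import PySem

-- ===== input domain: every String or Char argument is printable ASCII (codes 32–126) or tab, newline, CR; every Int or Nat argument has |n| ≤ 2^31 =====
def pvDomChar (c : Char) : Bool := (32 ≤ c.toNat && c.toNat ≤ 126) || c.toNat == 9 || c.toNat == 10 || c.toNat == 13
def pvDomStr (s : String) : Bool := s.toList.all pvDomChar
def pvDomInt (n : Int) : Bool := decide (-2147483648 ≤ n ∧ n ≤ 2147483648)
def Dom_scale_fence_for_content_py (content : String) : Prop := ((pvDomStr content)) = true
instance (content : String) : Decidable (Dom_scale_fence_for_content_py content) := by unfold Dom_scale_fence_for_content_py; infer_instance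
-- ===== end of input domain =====

-- B replaces A's explicit run-counting scan by searching for the shortest fence of
-- length >= 3 that does not occur as a substring of the content (objective: simpler).


-- ===== PORT A =====
-- for ch in content: update (max_run, current_run); fence_len = max(3, max_run + 1)
def scale_fence_for_content_py (content : String) : String × String :=
  let st := content.toList.foldl
    (fun (p : Nat × Nat) ch => if ch = '`' then (max p.1 (p.2 + 1), p.2 + 1) else (p.1, 0))
    (0, 0)
  let fence_len := max 3 (st.1 + 1)
  (String.ofList (List.replicate fence_len '`'), content)

-- ===== PORT B =====
-- while "`" * n in content: n += 1 — fuel = len(content) + 1 iterations always suffice,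
-- since a run of backticks cannot be longer than the content.
def pvAltLoop (content : String) : Nat → Nat → Nat
  | 0, n => n
  | fuel + 1, n =>
    if PySem.Str.isIn (String.ofList (List.replicate n '`')) content then
      pvAltLoop content fuel (n + 1)
    else n

def scale_fence_for_content_py_alt (content : String) : String × String :=
  let n := pvAltLoop content (content.toList.length + 1) 3
  (String.ofList (List.replicate n '`'), content)

-- ===== PRECONDITION & SPEC =====
def Spec_scale_fence_for_content_py (content : String) (out : String × String) : Prop := out = scale_fence_for_content_py_alt content
instance (content : String) (out : String × String) : Decidable (Spec_scale_fence_for_content_py content out) := by unfold Spec_scale_fence_for_content_py; infer_instance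

-- ===== CLAIM (what is proved, stated in full; the proofs are below) =====
def Claim_equal_scale_fence_for_content_py : Prop := ∀ (content : String), Dom_scale_fence_for_content_py content → Spec_scale_fence_for_content_py content (scale_fence_for_content_py content)

-- ===== LEMMAS AND PROOFS =====

-- x is infix of l ++ [a] iff it is infix of l or a suffix of l ++ [a]
lemma infix_concat_iff (x l : List Char) (a : Char) :
    x <:+: l ++ [a] ↔ x <:+: l ∨ x <:+ l ++ [a] := by
  constructor
  · intro h
    obtain ⟨s, t, he⟩ := h
    cases t using List.reverseRecOn with
    | nil => right; exact ⟨s, by simpa using he⟩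
    | append_singleton t b _ =>
      left
      have h1 : l ++ [a] = (s ++ x ++ t) ++ [b] := by simpa using he.symm
      have h2 := List.append_inj' h1 rfl
      exact ⟨s, t, by simpa using h2.1.symm⟩
  · rintro (h | h)
    · exact h.trans ⟨[], [a], by simp⟩
    · exact h.isInfix

lemma suffix_concat_concat_iff (x l : List Char) (c a : Char) :
    x ++ [c] <:+ l ++ [a] ↔ c = a ∧ x <:+ l := by
  constructor
  · rintro ⟨s, he⟩
    have h1 : (s ++ x) ++ [c] = l ++ [a] := by simpa using he
    have h2 := List.append_inj' h1 rfl
    exact ⟨by simpa using h2.2, ⟨s, h2.1⟩⟩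
  · rintro ⟨rfl, s, rfl⟩
    exact ⟨s, by simp⟩

-- A's fold state: first component = longest backtick run (as infix), second = trailing run (as suffix)
lemma fold_inv (l : List Char) :
    (∀ n, List.replicate n '`' <:+: l ↔
      n ≤ (l.foldl (fun (p : Nat × Nat) ch => if ch = '`' then (max p.1 (p.2 + 1), p.2 + 1) else (p.1, 0)) (0, 0)).1) ∧
    (∀ n, List.replicate n '`' <:+ l ↔
      n ≤ (l.foldl (fun (p : Nat × Nat) ch => if ch = '`' then (max p.1 (p.2 + 1), p.2 + 1) else (p.1, 0)) (0, 0)).2) := by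
  induction l using List.reverseRecOn with
  | nil =>
    constructor <;> intro n <;> cases n <;>
      simp [List.replicate_succ]
  | append_singleton l a ih =>
    obtain ⟨ihM, ihC⟩ := ih
    rw [List.foldl_append]
    set st := l.foldl (fun (p : Nat × Nat) ch => if ch = '`' then (max p.1 (p.2 + 1), p.2 + 1) else (p.1, 0)) (0, 0) with hst
    have hsuf : ∀ n, List.replicate n '`' <:+ l ++ [a] ↔
        n ≤ (if a = '`' then st.2 + 1 else 0) := by
      intro n
      cases n with
      | zero => simp
      | succ m =>
        rw [show List.replicate (m+1) '`' = List.replicate m '`' ++ ['`'] from List.replicate_succ', suffix_concat_concat_iff, ihC]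
        by_cases ha : a = '`' <;> simp [ha, eq_comm (a := '`')]
    constructor
    · intro n
      rw [infix_concat_iff, ihM, hsuf]
      by_cases ha : a = '`' <;> simp [List.foldl, ha]
      omega
    · intro n
      rw [hsuf]
      by_cases ha : a = '`' <;> simp [List.foldl, ha]

lemma altLoop_eq (content : String) (M : Nat)
    (hM : ∀ n, List.replicate n '`' <:+: content.toList ↔ n ≤ M) :
    ∀ fuel n, M + 1 ≤ n + fuel → pvAltLoop content fuel n = max n (M + 1) := by
  intro fuel
  induction fuel with
  | zero => intro n h; simp [pvAltLoop]; omega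
  | succ k ih =>
    intro n h
    rw [pvAltLoop]
    by_cases hin : PySem.Str.isIn (String.ofList (List.replicate n '`')) content = true
    · have hnM : n ≤ M := by
        have := (PySem.Str.isIn_iff_infix _ _).mp hin
        rw [← hM n]; simpa using this
      rw [if_pos hin, ih (n + 1) (by omega)]
      omega
    · have hnM : ¬ n ≤ M := by
        intro hle
        exact hin ((PySem.Str.isIn_iff_infix _ _).mpr (by simp; exact (hM n).mpr hle))
      rw [if_neg hin]
      omega

-- ===== VERDICT (by name: the statement is the Claim_ definition above) =====
theorem scale_fence_for_content_py_spec : Claim_equal_scale_fence_for_content_py := by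
  intro content _
  unfold Spec_scale_fence_for_content_py scale_fence_for_content_py scale_fence_for_content_py_alt
  obtain ⟨hM, _⟩ := fold_inv content.toList
  set M := (content.toList.foldl (fun (p : Nat × Nat) ch => if ch = '`' then (max p.1 (p.2 + 1), p.2 + 1) else (p.1, 0)) (0, 0)).1 with hMdef
  have hMlen : M ≤ content.toList.length := by
    have := (hM M).mpr le_rfl
    simpa using this.length_le
  have := altLoop_eq content M hM (content.toList.length + 1) 3 (by omega)
  simp only [this]
  congr 1
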